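-- pv_equiv track=rewrite | github.com/GTML-LAB/Equitorch | test/test_linear/test_linear_e3nn_channel_norm.py | e3nn_irrep_idx_to_eqt
-- ===== SOURCE A (Python) =====
-- def e3nn_irrep_idx_to_eqt(irreps_e3nn, channels_eqt):
--     acc_irrep_idx_eqt = 0
--     irrep_idx_eqt_list = []
--     for i, (mul, irrep) in enumerate(irreps_e3nn):
--         irrep_idx_eqt_list_in = []
--         for mul_eqt in range(mul//channels_eqt):
--             irrep_idx_eqt_list_in.append((mul_eqt, acc_irrep_idx_eqt))
--             acc_irrep_idx_eqt += 1
--             # irrep_idx_eqt_list_in.append(mul_eqt)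
--         irrep_idx_eqt_list.append(irrep_idx_eqt_list_in)
--     return irrep_idx_eqt_list
-- ===== SOURCE B (Python) =====
-- def e3nn_irrep_idx_to_eqt(irreps_e3nn, channels_eqt):
--     groups = [range(mul // channels_eqt) for mul, _ in irreps_e3nn]
--     offsets = [0]
--     for g in groups:
--         offsets.append(offsets[-1] + len(g))
--     return [[(j, off + j) for j in g] for g, off in zip(groups, offsets)]
-- ===== Notes on version B (the rewrite author's own statement) =====
-- stated objective: alternative
-- what changed: Replaces the threaded per-element global-index accumulator by precomputed per-group ranges and an offset table of prefix sums of group lengths, emitting each sublist independently as the closed form (j, offset_i + j); Pre_ excludes only channels_eqt = 0 with a nonempty list, where A raises ZeroDivisionError.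
import Mathlib
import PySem

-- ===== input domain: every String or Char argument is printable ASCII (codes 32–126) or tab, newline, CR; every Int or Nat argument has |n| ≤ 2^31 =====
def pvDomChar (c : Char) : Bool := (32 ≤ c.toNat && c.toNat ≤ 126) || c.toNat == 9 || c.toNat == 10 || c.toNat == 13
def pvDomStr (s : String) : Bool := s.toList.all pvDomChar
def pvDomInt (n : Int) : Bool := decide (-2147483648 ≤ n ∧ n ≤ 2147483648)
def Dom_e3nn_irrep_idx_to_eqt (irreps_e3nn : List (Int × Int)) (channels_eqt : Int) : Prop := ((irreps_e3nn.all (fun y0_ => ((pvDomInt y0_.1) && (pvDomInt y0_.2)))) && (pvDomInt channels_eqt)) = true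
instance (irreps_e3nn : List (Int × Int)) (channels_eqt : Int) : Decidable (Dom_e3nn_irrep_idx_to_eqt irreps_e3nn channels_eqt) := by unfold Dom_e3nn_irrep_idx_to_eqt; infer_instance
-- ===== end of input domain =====

-- B replaces A's threaded per-element global-index accumulator by precomputed per-group ranges
-- and an offset table of prefix sums of group lengths; same cost, different decomposition.

-- ===== PORT A =====
-- literal transliteration of A: enumerate loop threading (acc, out); inner range loop appends and bumps acc
def e3nn_irrep_idx_to_eqt (irreps_e3nn : List (Int × Int)) (channels_eqt : Int) : List (List (Int × Int)) :=
  ((PySem.List.enumerate irreps_e3nn 0).foldl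
    (fun (st : Int × List (List (Int × Int))) ip =>
      let inner := (PySem.List.pyRange 0 (PySem.Int.floordiv ip.2.1 channels_eqt) 1).foldl
        (fun (st2 : Int × List (Int × Int)) mul_eqt => (st2.1 + 1, st2.2 ++ [(mul_eqt, st2.1)]))
        (st.1, [])
      (inner.1, st.2 ++ [inner.2]))
    (0, [])).2

-- ===== PORT B =====
-- literal transliteration of Source B: per-group ranges, offsets by prefix sums of lengths,
-- then each sublist as an independent comprehension (j, off + j)
def e3nn_irrep_idx_to_eqt_alt (irreps_e3nn : List (Int × Int)) (channels_eqt : Int) : List (List (Int × Int)) :=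
  let groups := irreps_e3nn.map (fun p => PySem.List.pyRange 0 (PySem.Int.floordiv p.1 channels_eqt) 1)
  let offsets := groups.foldl (fun os g => os ++ [os.getLastD 0 + (g.length : Int)]) [0]
  (groups.zip offsets).map (fun p => p.1.map (fun j => (j, p.2 + j)))

-- ===== PRECONDITION & SPEC =====
-- Pre_ excludes exactly the inputs where Python A raises ZeroDivisionError: channels_eqt = 0 with a nonempty irreps list.
def Pre_e3nn_irrep_idx_to_eqt (irreps_e3nn : List (Int × Int)) (channels_eqt : Int) : Prop := irreps_e3nn = [] ∨ channels_eqt ≠ 0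
instance (irreps_e3nn : List (Int × Int)) (channels_eqt : Int) : Decidable (Pre_e3nn_irrep_idx_to_eqt irreps_e3nn channels_eqt) := by unfold Pre_e3nn_irrep_idx_to_eqt; infer_instance
def pvWitness_e3nn_irrep_idx_to_eqt : (List (Int × Int)) × Int := ([(4, 0), (2, 1), (5, -2)], 2)

def Spec_e3nn_irrep_idx_to_eqt (irreps_e3nn : List (Int × Int)) (channels_eqt : Int) (out : List (List (Int × Int))) : Prop := out = e3nn_irrep_idx_to_eqt_alt irreps_e3nn channels_eqt
instance (irreps_e3nn : List (Int × Int)) (channels_eqt : Int) (out : List (List (Int × Int))) : Decidable (Spec_e3nn_irrep_idx_to_eqt irreps_e3nn channels_eqt out) := by unfold Spec_e3nn_irrep_idx_to_eqt; infer_instance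

-- ===== CLAIM (what is proved, stated in full; the proofs are below) =====
def Claim_equal_e3nn_irrep_idx_to_eqt : Prop := ∀ (irreps_e3nn : List (Int × Int)) (channels_eqt : Int), Dom_e3nn_irrep_idx_to_eqt irreps_e3nn channels_eqt → Pre_e3nn_irrep_idx_to_eqt irreps_e3nn channels_eqt → Spec_e3nn_irrep_idx_to_eqt irreps_e3nn channels_eqt (e3nn_irrep_idx_to_eqt irreps_e3nn channels_eqt)

-- ===== LEMMAS AND PROOFS =====
-- reference value: one sublist per irrep, global indices starting at a
def pvGroups (c : Int) (a : Int) : List (Int × Int) → List (List (Int × Int))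
  | [] => []
  | p :: rest =>
    ((PySem.List.pyRange 0 (PySem.Int.floordiv p.1 c) 1).map (fun j => (j, a + j)))
      :: pvGroups c (a + max (PySem.Int.floordiv p.1 c) 0) rest

def pvTotal (c : Int) (irreps : List (Int × Int)) : Int :=
  (irreps.map (fun p => max (PySem.Int.floordiv p.1 c) 0)).sum

-- running offsets: prefix sums of group lengths starting after a
def pvScan (a : Int) : List (List Int) → List Int
  | [] => []
  | g :: gs => (a + (g.length : Int)) :: pvScan (a + (g.length : Int)) gs

-- A's outer loop body, with the inner loop already summarised
def pvStep (c : Int) (st : Int × List (List (Int × Int))) (ip : Int × (Int × Int)) :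
    Int × List (List (Int × Int)) :=
  (st.1 + max (PySem.Int.floordiv ip.2.1 c) 0,
   st.2 ++ [(PySem.List.pyRange 0 (PySem.Int.floordiv ip.2.1 c) 1).map (fun j => (j, st.1 + j))])

theorem pv_inner_range (N : Nat) (a : Int) (pre : List (Int × Int)) :
    ((List.range N).map (fun (k : Nat) => (k : Int))).foldl
      (fun (st2 : Int × List (Int × Int)) m => (st2.1 + 1, st2.2 ++ [(m, st2.1)])) (a, pre)
    = (a + N, pre ++ (List.range N).map (fun (k : Nat) => ((k : Int), a + (k : Int)))) := by
  induction N generalizing pre with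
  | zero => simp
  | succ n ih =>
      rw [List.range_succ, List.map_append, List.foldl_append, ih, List.map_append]
      simp only [List.map_cons, List.map_nil, List.foldl_cons, List.foldl_nil, List.append_assoc,
        Prod.mk.injEq]
      constructor
      · push_cast; ring
      · push_cast

theorem pv_pyRange_zero (n : Int) :
    PySem.List.pyRange 0 n 1 = (List.range n.toNat).map (fun (k : Nat) => (k : Int)) := by
  rw [PySem.List.pyRange_one]
  simp

theorem pv_pyRange_length (n : Int) :
    ((PySem.List.pyRange 0 n 1).length : Int) = max n 0 := by
  rw [pv_pyRange_zero]
  simp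

theorem pv_step_eq (c : Int) :
    (fun (st : Int × List (List (Int × Int))) (ip : Int × (Int × Int)) =>
      let inner := (PySem.List.pyRange 0 (PySem.Int.floordiv ip.2.1 c) 1).foldl
        (fun (st2 : Int × List (Int × Int)) mul_eqt => (st2.1 + 1, st2.2 ++ [(mul_eqt, st2.1)]))
        (st.1, [])
      (inner.1, st.2 ++ [inner.2]))
    = pvStep c := by
  funext st ip
  simp only [pv_pyRange_zero, pv_inner_range, pvStep, List.map_map, List.nil_append,
    Int.toNat_eq_max]
  rfl

theorem pv_outer_A (c : Int) (irreps : List (Int × Int)) :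
    ∀ (s a : Int) (out : List (List (Int × Int))),
    (PySem.List.enumerate irreps s).foldl (pvStep c) (a, out)
    = (a + pvTotal c irreps, out ++ pvGroups c a irreps) := by
  induction irreps with
  | nil => intro s a out; simp [pvTotal, pvGroups, PySem.List.enumerate]
  | cons p rest ih =>
      intro s a out
      rw [show PySem.List.enumerate (p :: rest) s = (s, p) :: PySem.List.enumerate rest (s + 1) from rfl,
        List.foldl_cons,
        show pvStep c (a, out) (s, p)
          = (a + max (PySem.Int.floordiv p.1 c) 0,
             out ++ [(PySem.List.pyRange 0 (PySem.Int.floordiv p.1 c) 1).map (fun j => (j, a + j))]) from rfl,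
        ih]
      rw [pvGroups]
      simp [pvTotal, add_assoc]

theorem pv_offsets (groups : List (List Int)) :
    ∀ (pre : List Int) (a : Int),
    groups.foldl (fun os g => os ++ [os.getLastD 0 + (g.length : Int)]) (pre ++ [a])
    = pre ++ a :: pvScan a groups := by
  induction groups with
  | nil => intro pre a; simp [pvScan]
  | cons g gs ih =>
      intro pre a
      rw [List.foldl_cons]
      have h : (pre ++ [a]).getLastD 0 = a := by simp
      rw [h, show pre ++ [a] ++ [a + (g.length : Int)] = (pre ++ [a]) ++ [a + (g.length : Int)] from rfl, ih]
      simp [pvScan]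

theorem pv_zip_groups (c : Int) (irreps : List (Int × Int)) :
    ∀ (a : Int),
    ((irreps.map (fun p => PySem.List.pyRange 0 (PySem.Int.floordiv p.1 c) 1)).zip
        (a :: pvScan a (irreps.map (fun p => PySem.List.pyRange 0 (PySem.Int.floordiv p.1 c) 1)))).map
      (fun p => p.1.map (fun j => (j, p.2 + j)))
    = pvGroups c a irreps := by
  induction irreps with
  | nil => intro a; simp [pvGroups]
  | cons p rest ih =>
      intro a
      simp only [List.map_cons, pvScan, List.zip_cons_cons, List.map]
      rw [pvGroups, pv_pyRange_length]
      exact congrArg _ (ih _)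

theorem pv_A_eq_groups (irreps : List (Int × Int)) (c : Int) :
    e3nn_irrep_idx_to_eqt irreps c = pvGroups c 0 irreps := by
  unfold e3nn_irrep_idx_to_eqt
  rw [pv_step_eq, pv_outer_A c irreps 0 0 []]
  simp

theorem pv_B_eq_groups (irreps : List (Int × Int)) (c : Int) :
    e3nn_irrep_idx_to_eqt_alt irreps c = pvGroups c 0 irreps := by
  show ((irreps.map (fun p => PySem.List.pyRange 0 (PySem.Int.floordiv p.1 c) 1)).zip
      ((irreps.map (fun p => PySem.List.pyRange 0 (PySem.Int.floordiv p.1 c) 1)).foldl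
        (fun os g => os ++ [os.getLastD 0 + (g.length : Int)]) [0])).map
    (fun p => p.1.map (fun j => (j, p.2 + j)))
    = pvGroups c 0 irreps
  rw [show ([0] : List Int) = [] ++ [0] from rfl, pv_offsets, List.nil_append]
  exact pv_zip_groups c irreps 0

-- ===== VERDICT (by name: the statement is the Claim_ definition above) =====
theorem e3nn_irrep_idx_to_eqt_spec : Claim_equal_e3nn_irrep_idx_to_eqt := by
  intro irreps c _ _
  unfold Spec_e3nn_irrep_idx_to_eqt
  rw [pv_A_eq_groups, pv_B_eq_groups]
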